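-- pv_equiv track=rewrite | github.com/miliar/Code_Jam_Webscraper | solutions_python/Problem_201/219.py | get_max_min
-- ===== SOURCE A (Python) =====
-- import heapq
--
-- def get_max_min(n, k):
--     """Get max(Ls, Rs) and min(Ls, Rs) after k people come."""
--
--     counts = {n: 1}
--     queue = [-n]
--     curr = None
--
--     while k > 0:
--
--         # Pop one smallest size.
--         size = -heapq.heappop(queue)
--         count = counts.pop(size)
--
--         quotient, rem = divmod(size, 2)
--         curr = (
--             quotient,
--             quotient if rem == 1 else quotient - 1
--         )
--
--         # Push in the new sizes.
--         for i in curr: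
--             if i in counts:
--                 counts[i] += count
--             else:
--                 counts[i] = count
--                 heapq.heappush(queue, -i)
--
--         k -= count
--
--         continue
--
--     assert curr is not None
--     return curr
-- ===== SOURCE B (Python) =====
-- def _bump(groups, h, count):
--     """Insert/merge (h, count) into a size-descending group list."""
--     if not groups:
--         return [(h, count)]
--     s, m = groups[0]
--     if h < s:
--         return [groups[0]] + _bump(groups[1:], h, count)
--     if h == s:
--         return [(h, m + count)] + groups[1:]
--     return [(h, count)] + groups
--
-- def get_max_min(n, k):
--     """Get max(Ls, Rs) and min(Ls, Rs) after k people come."""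
--     groups = [(n, 1)]          # (gap size, multiplicity), strictly descending by size
--     curr = None
--     while k > 0:
--         (size, count), groups = groups[0], groups[1:]
--         quotient, rem = divmod(size, 2)
--         curr = (quotient, quotient if rem == 1 else quotient - 1)
--         for h in curr:
--             groups = _bump(groups, h, count)
--         k -= count
--     assert curr is not None
--     return curr
-- ===== Notes on version B (the rewrite author's own statement) =====
-- stated objective: alternative
-- what changed: B replaces A's dict-plus-heap pair (with negation trick and membership-guarded pushes) by a single strictly-descending association list of (size,count) groups: the maximum is the list head and each half is merged in by ordered insertion, so the dict, the heap and their synchronisation disappear.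
import Mathlib
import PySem

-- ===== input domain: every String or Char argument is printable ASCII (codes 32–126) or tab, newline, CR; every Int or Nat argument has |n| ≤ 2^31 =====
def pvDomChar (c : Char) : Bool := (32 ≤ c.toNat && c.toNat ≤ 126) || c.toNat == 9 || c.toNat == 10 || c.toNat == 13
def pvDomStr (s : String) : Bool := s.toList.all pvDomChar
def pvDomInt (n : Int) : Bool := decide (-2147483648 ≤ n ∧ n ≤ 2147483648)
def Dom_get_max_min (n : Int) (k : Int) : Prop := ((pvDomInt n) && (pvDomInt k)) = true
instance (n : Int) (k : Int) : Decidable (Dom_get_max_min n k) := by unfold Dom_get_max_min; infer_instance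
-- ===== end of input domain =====

-- B replaces A's dict+heap pair by ONE strictly-descending association list of (size,count)
-- groups: max = head, halves merged back by ordered insertion (objective: alternative).
-- Proved equal for k ≥ 1; for k ≤ 0 both Pythons raise AssertionError (excluded by Pre_).

-- ===== PORT A =====
-- heapq is a library call in A; it is ported by its contract: the queue is the list of pushed
-- elements, heappush appends, heappop removes and returns the minimum element (exact here, since
-- the queue never holds duplicates: A pushes -i only when i is not a key of counts).
def pushA (counts : PySem.Dict Int Int) (queue : List Int) (i count : Int) :
    PySem.Dict Int Int × List Int :=
  if counts.contains i then
    (counts.insert i (counts.getD i 0 + count), queue)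
  else
    (counts.insert i count, queue ++ [-i])

def loopA : Nat → PySem.Dict Int Int → List Int → Option (Int × Int) → Int → Option (Int × Int)
  | 0, _, _, curr, _ => curr                       -- fuel exhausted (never happens: k drops by ≥ 1 per round)
  | Nat.succ fuel, counts, queue, curr, k =>
    if k > 0 then
      match PySem.List.min? queue (fun x => x) with
      | none => none                               -- heappop on empty queue: IndexError (unreachable)
      | some m =>
        let queue' := (PySem.List.remove? queue m).getD []
        let size := -m
        match counts.get? size with
        | none => none                             -- counts.pop KeyError (unreachable)
        | some count =>
          let counts' := counts.erase size
          let quotient := PySem.Int.floordiv size 2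
          let rem := PySem.Int.mod size 2
          let curr' : Int × Int := (quotient, if rem == 1 then quotient else quotient - 1)
          let s1 := pushA counts' queue' curr'.1 count
          let s2 := pushA s1.1 s1.2 curr'.2 count
          loopA fuel s2.1 s2.2 (some curr') (k - count)
    else curr

def get_max_min (n : Int) (k : Int) : Int × Int :=
  (loopA (k.toNat + 1) (PySem.Dict.ofList [(n, 1)]) [-n] none k).getD (0, 0)

-- ===== PORT B =====
-- _bump: insert/merge (h, count) into a size-descending group list
def bumpB : List (Int × Int) → Int → Int → List (Int × Int)
  | [], h, count => [(h, count)]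
  | (s, m) :: t, h, count =>
    if h < s then (s, m) :: bumpB t h count
    else if h == s then (h, m + count) :: t
    else (h, count) :: (s, m) :: t

def loopB : Nat → List (Int × Int) → Option (Int × Int) → Int → Option (Int × Int)
  | 0, _, curr, _ => curr                          -- fuel exhausted (never happens: k drops by ≥ 1 per round)
  | Nat.succ fuel, groups, curr, k =>
    if k > 0 then
      match groups with
      | [] => none                                 -- groups[0] on an empty list: IndexError (unreachable)
      | (size, count) :: rest =>
        let quotient := PySem.Int.floordiv size 2
        let rem := PySem.Int.mod size 2
        let curr' : Int × Int := (quotient, if rem == 1 then quotient else quotient - 1)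
        loopB fuel (bumpB (bumpB rest curr'.1 count) curr'.2 count) (some curr') (k - count)
    else curr

def get_max_min_alt (n : Int) (k : Int) : Int × Int :=
  (loopB (k.toNat + 1) [(n, 1)] none k).getD (0, 0)

-- ===== PRECONDITION & SPEC =====
-- Pre_ excludes k ≤ 0, on which the Python A (and B alike) hits `assert curr is not None` and
-- raises AssertionError, returning no value.
def Pre_get_max_min (n : Int) (k : Int) : Prop := 1 ≤ k
instance (n : Int) (k : Int) : Decidable (Pre_get_max_min n k) := by
  unfold Pre_get_max_min; infer_instance
def pvWitness_get_max_min : Int × Int := (8, 3)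

def Spec_get_max_min (n : Int) (k : Int) (out : Int × Int) : Prop := out = get_max_min_alt n k
instance (n : Int) (k : Int) (out : Int × Int) : Decidable (Spec_get_max_min n k out) := by
  unfold Spec_get_max_min; infer_instance

-- ===== CLAIM (what is proved, stated in full; the proofs are below) =====
def Claim_equal_get_max_min : Prop :=
  ∀ (n : Int) (k : Int), Dom_get_max_min n k → Pre_get_max_min n k →
    Spec_get_max_min n k (get_max_min n k)

-- ===== LEMMAS AND PROOFS =====

-- items of an erased dict are the filtered items (definitional)
theorem items_erase_eq_filter (d : PySem.Dict Int Int) (s : Int) :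
    (d.erase s).items = d.items.filter (fun p => !(p.1 == s)) := rfl

theorem keys_erase_of_nodup (d : PySem.Dict Int Int) (s : Int) (hnd : d.keys.Nodup) :
    (d.erase s).keys = d.keys.erase s := by
  have h : (d.erase s).keys = d.keys.filter (fun x => !(x == s)) := by
    show (d.items.filter (fun p => !(p.1 == s))).map (·.1)
        = (d.items.map (·.1)).filter (fun x => !(x == s))
    induction d.items with
    | nil => rfl
    | cons p t ih => by_cases h : p.1 = s <;> simp [h, ih]
  rw [h, List.Nodup.erase_eq_filter hnd s]; rfl

theorem nodup_keys_erase (d : PySem.Dict Int Int) (s : Int) (hnd : d.keys.Nodup) :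
    (d.erase s).keys.Nodup := by
  rw [keys_erase_of_nodup d s hnd]; exact hnd.erase s

-- descending order on group lists
def SortedD (g : List (Int × Int)) : Prop := g.Pairwise (fun p q => q.1 < p.1)

-- equation lemmas for bumpB
theorem bumpB_lt (s m h c : Int) (t : List (Int × Int)) (h1 : h < s) :
    bumpB ((s, m) :: t) h c = (s, m) :: bumpB t h c := by
  simp [bumpB, h1]

theorem bumpB_eq (h m c : Int) (t : List (Int × Int)) :
    bumpB ((h, m) :: t) h c = (h, m + c) :: t := by
  simp [bumpB]

theorem bumpB_gt (s m h c : Int) (t : List (Int × Int)) (h1 : s < h) :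
    bumpB ((s, m) :: t) h c = (h, c) :: (s, m) :: t := by
  have h2 : ¬ h < s := by omega
  have h3 : (h == s) = false := by simp; omega
  simp [bumpB, h2, h3]

-- every key of a bumped list is the new key or an old key
theorem bumpB_fst_mem (g : List (Int × Int)) (h c : Int) :
    ∀ x ∈ (bumpB g h c).map Prod.fst, x = h ∨ x ∈ g.map Prod.fst := by
  induction g with
  | nil => intro x hx; simp [bumpB] at hx; simp [hx]
  | cons p t ih =>
    obtain ⟨s, m⟩ := p
    intro x hx
    rcases lt_trichotomy h s with h1 | h1 | h1
    · rw [bumpB_lt s m h c t h1] at hx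
      simp only [List.map_cons, List.mem_cons] at hx
      rcases hx with hx | hx
      · right; simp [hx]
      · rcases ih x hx with hx' | hx'
        · left; exact hx'
        · right; simp [hx']
    · subst h1
      rw [bumpB_eq h m c t] at hx
      simp only [List.map_cons, List.mem_cons] at hx
      rcases hx with hx | hx
      · left; exact hx
      · right; simp [hx]
    · rw [bumpB_gt s m h c t h1] at hx
      simp only [List.map_cons, List.mem_cons] at hx
      rcases hx with hx | hx | hx
      · left; exact hx
      · right; simp [hx]
      · right; simp [hx]

theorem bumpB_sorted (g : List (Int × Int)) (h c : Int) (hs : SortedD g) :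
    SortedD (bumpB g h c) := by
  induction g with
  | nil => simp [bumpB, SortedD]
  | cons p t ih =>
    obtain ⟨s, m⟩ := p
    obtain ⟨hhd, htl⟩ := List.pairwise_cons.mp hs
    rcases lt_trichotomy h s with h1 | h1 | h1
    · rw [bumpB_lt s m h c t h1]
      refine List.pairwise_cons.mpr ⟨?_, ih htl⟩
      intro q hq
      rcases bumpB_fst_mem t h c q.1 (List.mem_map_of_mem hq) with hx | hx
      · simp only; omega
      · obtain ⟨q', hq', hq'e⟩ := List.mem_map.mp hx
        have := hhd q' hq'; simp only at this ⊢; omega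
    · subst h1
      rw [bumpB_eq h m c t]
      refine List.pairwise_cons.mpr ⟨?_, htl⟩
      intro q hq; have := hhd q hq; simpa using this
    · rw [bumpB_gt s m h c t h1]
      refine List.pairwise_cons.mpr ⟨?_, hs⟩
      intro q hq
      simp only [List.mem_cons] at hq
      rcases hq with hq | hq
      · simp [hq]; omega
      · have := hhd q hq; simp only at this ⊢; omega

theorem bumpB_perm_of_not_mem (g : List (Int × Int)) (h c : Int)
    (hnm : h ∉ g.map Prod.fst) : (bumpB g h c).Perm ((h, c) :: g) := by
  induction g with
  | nil => simp [bumpB]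
  | cons p t ih =>
    obtain ⟨s, m⟩ := p
    simp only [List.map_cons, List.mem_cons] at hnm
    rw [not_or] at hnm
    rcases lt_trichotomy h s with h1 | h1 | h1
    · rw [bumpB_lt s m h c t h1]
      exact ((ih hnm.2).cons (s, m)).trans (List.Perm.swap _ _ _)
    · exact absurd h1 hnm.1
    · rw [bumpB_gt s m h c t h1]

theorem bumpB_of_mem (g : List (Int × Int)) (h m c : Int) (hs : SortedD g)
    (hm : (h, m) ∈ g) :
    bumpB g h c = g.map (fun p => if p.1 == h then (h, m + c) else p) := by
  induction g with
  | nil => simp at hm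
  | cons p t ih =>
    obtain ⟨s, m0⟩ := p
    obtain ⟨hhd, htl⟩ := List.pairwise_cons.mp hs
    simp only [List.mem_cons] at hm
    rcases lt_trichotomy h s with h1 | h1 | h1
    · have hmt : (h, m) ∈ t := by
        rcases hm with hm | hm
        · exfalso; have : h = s := congrArg Prod.fst hm; omega
        · exact hm
      have hbe : ((s : Int) == h) = false := by simp; omega
      rw [bumpB_lt s m0 h c t h1, ih htl hmt, List.map_cons, hbe]
      simp
    · subst h1
      have hm0 : m = m0 := by
        rcases hm with hm | hm
        · exact ((Prod.mk.injEq _ _ _ _).mp hm).2.symm ▸ rfl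
        · exfalso; have := hhd _ hm; simp only at this; omega
      subst hm0
      rw [bumpB_eq h m c t, List.map_cons]
      have ht : t.map (fun p => if p.1 == h then (h, m + c) else p) = t := by
        conv_rhs => rw [← List.map_id t]
        refine List.map_congr_left ?_
        intro q hq
        have := hhd q hq
        have hbe : (q.1 == h) = false := by simp only at this; simp; omega
        simp [hbe]
      rw [ht]
      simp
    · exfalso
      rcases hm with hm | hm
      · have : h = s := congrArg Prod.fst hm; omega
      · have := hhd _ hm; simp only at this; omega

-- the full state invariant: A's (counts, queue) vs B's groups list
def StEq (counts : PySem.Dict Int Int) (queue : List Int) (groups : List (Int × Int)) : Prop :=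
  (queue.map (fun x : Int => -x)).Perm counts.keys ∧ counts.keys.Nodup ∧
  groups.Perm counts.items ∧ SortedD groups

theorem keys_perm_of_items_perm (counts : PySem.Dict Int Int) (groups : List (Int × Int))
    (hp : groups.Perm counts.items) : (groups.map Prod.fst).Perm counts.keys :=
  hp.map Prod.fst

theorem stEq_push (counts : PySem.Dict Int Int) (queue : List Int) (groups : List (Int × Int))
    (h c : Int) (hI : StEq counts queue groups) :
    StEq (pushA counts queue h c).1 (pushA counts queue h c).2 (bumpB groups h c) := by
  obtain ⟨hq, hnd, hp, hs⟩ := hI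
  by_cases hc : counts.contains h = true
  · -- existing key: A rewrites the entry in place, B merges at the entry
    have hmemk : h ∈ counts.keys := (PySem.Dict.contains_iff_mem_keys counts h).mp hc
    have hmemg : h ∈ groups.map Prod.fst :=
      (keys_perm_of_items_perm _ _ hp).mem_iff.mpr hmemk
    obtain ⟨p, hpg0, hpe⟩ := List.mem_map.mp hmemg
    obtain ⟨h', m⟩ := p
    have hpg : (h, m) ∈ groups := by
      have hh' : h' = h := hpe
      rwa [hh'] at hpg0
    have hitems : (h, m) ∈ counts.items := hp.mem_iff.mp hpg
    have hgd : counts.getD h 0 = m := PySem.Dict.getD_of_mem_items counts hitems hnd 0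
    unfold pushA
    simp only [hc, if_true]
    refine ⟨?_, ?_, ?_, bumpB_sorted _ _ _ hs⟩
    · rw [PySem.Dict.keys_insert_of_contains counts _ hc]; exact hq
    · rw [PySem.Dict.keys_insert_of_contains counts _ hc]; exact hnd
    · rw [PySem.Dict.items_insert_of_contains counts _ hc,
        bumpB_of_mem groups h m c hs hpg, hgd]
      exact hp.map _
  · -- new key: A appends to items and queue, B inserts the fresh group
    have hc' : counts.contains h = false := eq_false_of_ne_true hc
    have hmemk : h ∉ counts.keys := fun hm =>
      hc ((PySem.Dict.contains_iff_mem_keys counts h).mpr hm)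
    have hmemg : h ∉ groups.map Prod.fst := fun hm =>
      hmemk ((keys_perm_of_items_perm _ _ hp).mem_iff.mp hm)
    unfold pushA
    simp only [hc', Bool.false_eq_true, if_false]
    refine ⟨?_, ?_, ?_, bumpB_sorted _ _ _ hs⟩
    · rw [PySem.Dict.keys_insert_of_not_contains counts _ hc']
      simpa using hq.append (List.Perm.refl [h])
    · rw [PySem.Dict.keys_insert_of_not_contains counts _ hc']
      simp only [List.nodup_append]
      refine ⟨hnd, List.nodup_singleton h, ?_⟩
      intro a ha b hb heq
      have hbh : b = h := by simpa using hb
      rw [heq, hbh] at ha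
      exact hmemk ha
    · rw [PySem.Dict.items_insert_of_not_contains counts _ hc']
      exact (bumpB_perm_of_not_mem groups h c hmemg).trans
        ((hp.cons (h, c)).trans (List.perm_append_singleton _ _).symm)

-- the heap minimum is minus the maximum key
theorem min_queue_eq (counts : PySem.Dict Int Int) (queue : List Int)
    (h : (queue.map (fun x : Int => -x)).Perm counts.keys) :
    PySem.List.min? queue (fun x => x)
      = (PySem.List.max? counts.keys (fun x => x)).map (fun x : Int => -x) := by
  cases hM : PySem.List.max? counts.keys (fun x => x) with
  | none =>
    have hk : counts.keys = [] := (PySem.List.max?_eq_none_iff _ _).mp hM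
    have hq : queue = [] := by
      have hmapnil : queue.map (fun x : Int => -x) = [] := by
        have : (queue.map (fun x : Int => -x)).Perm [] := hk ▸ h
        exact this.eq_nil
      simpa using hmapnil
    simp [hq, PySem.List.min?]
  | some M =>
    have hMmem : M ∈ counts.keys := PySem.List.max?_mem hM
    have hMmax : ∀ y ∈ counts.keys, y ≤ M := PySem.List.max?_isMax hM
    have hnegM : -M ∈ queue := by
      have : M ∈ queue.map (fun x : Int => -x) := h.mem_iff.mpr hMmem
      obtain ⟨x, hx, hxe⟩ := List.mem_map.mp this
      have : x = -M := by omega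
      rwa [this] at hx
    cases hm : PySem.List.min? queue (fun x => x) with
    | none =>
      have : queue = [] := (PySem.List.min?_eq_none_iff _ _).mp hm
      rw [this] at hnegM; simp at hnegM
    | some m =>
      have hmmem : m ∈ queue := PySem.List.min?_mem hm
      have hmmin : ∀ y ∈ queue, m ≤ y := PySem.List.min?_isMin hm
      have h1 : -m ≤ M := hMmax _ (h.mem_iff.mp (List.mem_map_of_mem hmmem))
      have h2 : m ≤ -M := hmmin _ hnegM
      have : m = -M := by omega
      simp [this]

-- the head of B's sorted group list is A's popped maximum
theorem max_keys_eq_head (counts : PySem.Dict Int Int) (s c : Int) (rest : List (Int × Int))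
    (hp : ((s, c) :: rest).Perm counts.items) (hs : SortedD ((s, c) :: rest)) :
    PySem.List.max? counts.keys (fun x => x) = some s := by
  have hkp : (s :: rest.map Prod.fst).Perm counts.keys := by
    simpa using keys_perm_of_items_perm counts ((s, c) :: rest) hp
  have hsmem : s ∈ counts.keys := hkp.mem_iff.mp List.mem_cons_self
  have hle : ∀ y ∈ counts.keys, y ≤ s := by
    intro y hy
    rcases List.mem_cons.mp (hkp.mem_iff.mpr hy) with hy' | hy'
    · omega
    · obtain ⟨q, hq, hqe⟩ := List.mem_map.mp hy'
      have := (List.pairwise_cons.mp hs).1 q hq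
      simp only at this; omega
  cases hM : PySem.List.max? counts.keys (fun x => x) with
  | none =>
    have hk : counts.keys = [] := (PySem.List.max?_eq_none_iff _ _).mp hM
    rw [hk] at hsmem; simp at hsmem
  | some M =>
    have h1 : M ≤ s := hle _ (PySem.List.max?_mem hM)
    have h2 : s ≤ M := PySem.List.max?_isMax hM _ hsmem
    have : M = s := le_antisymm h1 h2
    simp [this]

theorem loopA_eq_loopB (fuel : Nat) (counts : PySem.Dict Int Int) (queue : List Int)
    (groups : List (Int × Int)) (curr : Option (Int × Int)) (k : Int)
    (hI : StEq counts queue groups) :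
    loopA fuel counts queue curr k = loopB fuel groups curr k := by
  induction fuel generalizing counts queue groups curr k with
  | zero => rfl
  | succ fuel ih =>
    obtain ⟨hq, hnd, hp, hs⟩ := hI
    cases groups with
    | nil =>
      rw [loopA, loopB]
      by_cases hk : k > 0
      · simp only [hk, if_true]
        -- both sides hit their unreachable-empty branch
        have hitems : counts.items = [] := hp.symm.eq_nil
        have hkeys : counts.keys = [] := by
          show counts.items.map (·.1) = []
          simp [hitems]
        have hqnil : queue = [] := by
          have : (queue.map (fun x : Int => -x)).Perm [] := hkeys ▸ hq
          simpa using this.eq_nil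
        simp [hqnil, PySem.List.min?]
      · simp [hk]
    | cons g rest =>
      obtain ⟨s, c⟩ := g
      rw [loopA, loopB]
      by_cases hk : k > 0
      · simp only [hk, if_true]
        rw [min_queue_eq counts queue hq, max_keys_eq_head counts s c rest hp hs]
        simp only [Option.map_some]
        have hsize : -(-s) = s := by omega
        rw [hsize]
        have hitems : (s, c) ∈ counts.items := hp.mem_iff.mp List.mem_cons_self
        have hget : counts.get? s = some c := PySem.Dict.get?_of_mem_items counts hitems hnd
        rw [hget]
        simp only
        have hsmem : s ∈ counts.keys := by
          have hkp := keys_perm_of_items_perm counts _ hp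
          exact hkp.mem_iff.mp (by simp)
        have hnegs : -s ∈ queue := by
          have : s ∈ queue.map (fun x : Int => -x) := hq.mem_iff.mpr hsmem
          obtain ⟨x, hx, hxe⟩ := List.mem_map.mp this
          have : x = -s := by omega
          rwa [this] at hx
        have hrm : (PySem.List.remove? queue (-s)).getD [] = queue.erase (-s) := by
          rw [PySem.List.remove?_eq_some_erase queue _ hnegs]; rfl
        rw [hrm]
        have hrestkeys : ∀ q ∈ rest, q.1 < s := by
          intro q hqr
          have := (List.pairwise_cons.mp hs).1 q hqr
          simpa using this
        have hinv' : StEq (counts.erase s) (queue.erase (-s)) rest := by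
          refine ⟨?_, nodup_keys_erase _ _ hnd, ?_, (List.pairwise_cons.mp hs).2⟩
          · rw [keys_erase_of_nodup _ _ hnd]
            have hmap : (queue.erase (-s)).map (fun x : Int => -x)
                = (queue.map (fun x : Int => -x)).erase s := by
              have := List.map_erase (f := fun x : Int => -x) neg_injective
                (a := -s) (l := queue)
              rwa [hsize] at this
            rw [hmap]
            exact hq.erase s
          · have hfilter : ((s, c) :: rest).filter (fun p => !(p.1 == s)) = rest := by
              have hbe : ((s : Int) == s) = true := by simp
              simp only [List.filter_cons, hbe, Bool.not_true, Bool.false_eq_true, if_false]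
              exact List.filter_eq_self.mpr (fun q hqr => by
                have := hrestkeys q hqr; simp; omega)
            have hperm := hp.filter (fun p => !(p.1 == s))
            rw [hfilter] at hperm
            rw [items_erase_eq_filter]
            exact hperm
        have hinv1 := stEq_push _ _ _ (PySem.Int.floordiv s 2) c hinv'
        have hinv2 := stEq_push _ _ _
          (if PySem.Int.mod s 2 == 1 then PySem.Int.floordiv s 2
           else PySem.Int.floordiv s 2 - 1) c hinv1
        exact ih _ _ _ _ _ hinv2
      · simp [hk]

theorem stEq_init (n : Int) : StEq (PySem.Dict.ofList [(n, 1)]) [-n] [(n, 1)] := by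
  have hitems : (PySem.Dict.ofList [((n : Int), (1 : Int))]).items = [(n, 1)] := by
    simp [PySem.Dict.ofList, PySem.Dict.update, PySem.Dict.insert, PySem.Dict.empty,
      PySem.Dict.contains]
  have hkeys : (PySem.Dict.ofList [((n : Int), (1 : Int))]).keys = [n] := by
    show (PySem.Dict.ofList [((n : Int), (1 : Int))]).items.map (·.1) = [n]
    rw [hitems]; rfl
  refine ⟨?_, ?_, ?_, ?_⟩
  · rw [hkeys]; simp
  · rw [hkeys]; simp
  · rw [hitems]
  · simp [SortedD]

-- ===== VERDICT (by name: the statement is the Claim_ definition above) =====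
theorem get_max_min_spec : Claim_equal_get_max_min := by
  intro n k _ _
  show get_max_min n k = get_max_min_alt n k
  unfold get_max_min get_max_min_alt
  rw [loopA_eq_loopB _ _ _ _ _ _ (stEq_init n)]
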